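-- pv_equiv track=rewrite | github.com/veera491/vm-home-backup | swarm_cmds.py | partition_blocks
-- ===== SOURCE A (Python) =====
-- def partition_blocks(total_blocks: int, num_vms: int):
--     q, r = divmod(total_blocks, num_vms)
--     counts = [q + 1] * r + [q] * (num_vms - r)
--
--     ranges = []
--     start = 0
--     for c in counts:
--         end = start + c
--         ranges.append((start, end))
--         start = end
--     return counts, ranges
-- ===== SOURCE B (Python) =====
-- def partition_blocks(total_blocks: int, num_vms: int):
--     q, r = divmod(total_blocks, num_vms)
--     counts = [q + 1 if i < r else q for i in range(num_vms)]
--     ranges = []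
--     for i in range(num_vms):
--         c = q + 1 if i < r else q
--         start = i * q + min(i, r)
--         ranges.append((start, start + c))
--     return counts, ranges
-- ===== Notes on version B (the rewrite author's own statement) =====
-- stated objective: alternative
-- what changed: Replaces the stateful loop that threads a running start accumulator with a stateless per-index computation: each chunk's start is obtained by the closed-form prefix offset i*q + min(i, r) instead of being accumulated.
import Mathlib
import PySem

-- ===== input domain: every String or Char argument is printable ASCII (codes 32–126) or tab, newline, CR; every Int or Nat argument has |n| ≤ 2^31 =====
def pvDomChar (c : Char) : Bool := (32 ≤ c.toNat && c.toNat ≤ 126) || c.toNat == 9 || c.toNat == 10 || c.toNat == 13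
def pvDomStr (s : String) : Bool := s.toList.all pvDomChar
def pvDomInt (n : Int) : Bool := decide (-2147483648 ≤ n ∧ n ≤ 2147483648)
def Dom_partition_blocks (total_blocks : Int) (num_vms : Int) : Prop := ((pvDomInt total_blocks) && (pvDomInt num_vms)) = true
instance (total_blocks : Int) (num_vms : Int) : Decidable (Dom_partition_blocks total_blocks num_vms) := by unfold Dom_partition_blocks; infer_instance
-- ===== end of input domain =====

-- B replaces A's running-start accumulator with a stateless closed-form prefix offset i*q + min(i,r) per index (alternative decomposition, same cost).

-- ===== PORT A =====
-- literal transliteration of A: divmod, replicated counts list, fold threading (ranges, start)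
def partition_blocks (total_blocks : Int) (num_vms : Int) : List Int × (List (Int × Int)) :=
  let q := PySem.Int.floordiv total_blocks num_vms
  let r := PySem.Int.mod total_blocks num_vms
  let counts := List.replicate r.toNat (q + 1) ++ List.replicate (num_vms - r).toNat q
  let st := counts.foldl
    (fun (st : List (Int × Int) × Int) c =>
      let e := st.2 + c
      (st.1 ++ [(st.2, e)], e))
    ([], 0)
  (counts, st.1)

-- ===== PORT B =====
-- literal transliteration of B: per-index formulas, no accumulator
def partition_blocks_alt (total_blocks : Int) (num_vms : Int) : List Int × (List (Int × Int)) :=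
  let q := PySem.Int.floordiv total_blocks num_vms
  let r := PySem.Int.mod total_blocks num_vms
  let counts := (PySem.List.pyRange 0 num_vms 1).map (fun i => if i < r then q + 1 else q)
  let ranges := (PySem.List.pyRange 0 num_vms 1).map (fun i =>
    let c := if i < r then q + 1 else q
    let start := i * q + min i r
    (start, start + c))
  (counts, ranges)

-- ===== PRECONDITION & SPEC =====
-- Pre_ excludes only num_vms = 0, where Python's divmod raises ZeroDivisionError.
def Pre_partition_blocks (_total_blocks : Int) (num_vms : Int) : Prop := num_vms ≠ 0
instance (total_blocks : Int) (num_vms : Int) : Decidable (Pre_partition_blocks total_blocks num_vms) := by unfold Pre_partition_blocks; infer_instance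
def pvWitness_partition_blocks : Int × Int := (10, 3)

def Spec_partition_blocks (total_blocks : Int) (num_vms : Int) (out : List Int × (List (Int × Int))) : Prop := out = partition_blocks_alt total_blocks num_vms
instance (total_blocks : Int) (num_vms : Int) (out : List Int × (List (Int × Int))) : Decidable (Spec_partition_blocks total_blocks num_vms out) := by unfold Spec_partition_blocks; infer_instance

-- ===== CLAIM (what is proved, stated in full; the proofs are below) =====
def Claim_equal_partition_blocks : Prop := ∀ (total_blocks : Int) (num_vms : Int), Dom_partition_blocks total_blocks num_vms → Pre_partition_blocks total_blocks num_vms → Spec_partition_blocks total_blocks num_vms (partition_blocks total_blocks num_vms)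

-- ===== LEMMAS AND PROOFS =====

-- prefix-range characterisation of A's fold
def prefixR (s : Int) : List Int → List (Int × Int)
  | [] => []
  | c :: cs => (s, s + c) :: prefixR (s + c) cs

theorem foldA_eq (cs : List Int) (acc : List (Int × Int)) (s : Int) :
    cs.foldl (fun (st : List (Int × Int) × Int) c => (st.1 ++ [(st.2, st.2 + c)], st.2 + c)) (acc, s)
      = (acc ++ prefixR s cs, s + cs.sum) := by
  induction cs generalizing acc s with
  | nil => simp [prefixR]
  | cons c cs ih => simp [List.foldl, prefixR, ih, add_assoc]

theorem prefixR_append (l1 l2 : List Int) (s : Int) :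
    prefixR s (l1 ++ l2) = prefixR s l1 ++ prefixR (s + l1.sum) l2 := by
  induction l1 generalizing s with
  | nil => simp [prefixR]
  | cons c cs ih => simp [prefixR, ih, add_assoc]

theorem prefixR_replicate (n : Nat) (c s : Int) :
    prefixR s (List.replicate n c)
      = (List.range n).map (fun i : Nat => (s + (i : Int) * c, s + ((i : Int) + 1) * c)) := by
  induction n generalizing s with
  | zero => simp [prefixR]
  | succ m ih =>
      rw [List.replicate_succ, List.range_succ_eq_map, List.map_cons, List.map_map]
      simp only [prefixR, ih]
      congr 1
      · norm_num
      · apply List.map_congr_left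
        intro x _
        simp only [Function.comp_apply, Prod.mk.injEq]
        push_cast
        constructor <;> ring

theorem mod_bounds (a b : Int) (hb : b ≠ 0) :
    (0 < b → 0 ≤ PySem.Int.mod a b ∧ PySem.Int.mod a b < b) ∧
    (b < 0 → b < PySem.Int.mod a b ∧ PySem.Int.mod a b ≤ 0) := by
  constructor
  · intro h
    rw [PySem.Int.mod_eq_emod_of_pos h]
    exact ⟨Int.emod_nonneg a hb, Int.emod_lt_of_pos a h⟩
  · intro h
    have h' : 0 < -b := by omega
    have e : PySem.Int.mod a b = -PySem.Int.mod (-a) (-b) := by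
      rw [PySem.Int.mod_neg_neg]; ring
    have h1 := Int.emod_nonneg (-a) (by omega : (-b) ≠ (0:Int))
    have h2 := Int.emod_lt_of_pos (-a) h'
    rw [e, PySem.Int.mod_eq_emod_of_pos h']
    omega

-- ===== VERDICT (by name: the statement is the Claim_ definition above) =====
theorem partition_blocks_spec : Claim_equal_partition_blocks := by
  intro t n _ hn
  have hn0 : n ≠ 0 := hn
  unfold Spec_partition_blocks
  simp only [partition_blocks, partition_blocks_alt]
  set q := PySem.Int.floordiv t n with hq
  set r := PySem.Int.mod t n with hr
  by_cases hpos : 0 < n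
  · have hrb := (mod_bounds t n hn0).1 hpos
    have hr0 : 0 ≤ r := by rw [hr]; exact hrb.1
    have hrn : r < n := by rw [hr]; exact hrb.2
    clear_value q r
    set a := r.toNat with ha
    set b := (n - r).toNat with hb
    have hac : (a : Int) = r := by rw [ha]; exact Int.toNat_of_nonneg hr0
    have hbc : (b : Int) = n - r := by rw [hb]; exact Int.toNat_of_nonneg (by omega)
    clear_value a b
    have hab : n.toNat = a + b := by omega
    rw [PySem.List.pyRange_one, foldA_eq, prefixR_append, prefixR_replicate, prefixR_replicate]
    simp only [sub_zero, hab, List.range_add, List.map_append, List.map_map,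
               List.sum_replicate, nsmul_eq_mul, List.nil_append, zero_add,
               Prod.mk.injEq]
    refine ⟨?_, ?_⟩
    · -- counts
      congr 1
      · symm
        rw [List.eq_replicate_iff]
        refine ⟨by simp, ?_⟩
        intro y hy
        simp only [List.mem_map, List.mem_range, Function.comp_apply] at hy
        obtain ⟨x, hx, hxy⟩ := hy
        rw [← hxy, if_pos (by omega : ((x:Int) < r))]
      · symm
        rw [List.eq_replicate_iff]
        refine ⟨by simp, ?_⟩
        intro y hy
        simp only [List.mem_map, List.mem_range, Function.comp_apply] at hy
        obtain ⟨x, hx, hxy⟩ := hy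
        rw [← hxy, if_neg (by push_cast; omega : ¬ (((a + x : Nat) : Int) < r))]
    · -- ranges
      congr 1
      · apply List.map_congr_left
        intro x hx
        have hxa : x < a := List.mem_range.mp hx
        simp only [Function.comp_apply, Prod.mk.injEq]
        rw [if_pos (by omega : ((x:Int) < r)), min_eq_left (by omega : ((x:Int) ≤ r))]
        constructor <;> ring
      · apply List.map_congr_left
        intro x hx
        simp only [Function.comp_apply, Prod.mk.injEq]
        rw [if_neg (by push_cast; omega : ¬ (((a + x : Nat) : Int) < r)),
            min_eq_right (by push_cast; omega : r ≤ ((a + x : Nat) : Int))]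
        push_cast
        rw [← hac]
        constructor <;> ring
  · have hneg : n < 0 := by omega
    have hrb := (mod_bounds t n hn0).2 hneg
    have hr1 : n < r := by rw [hr]; exact hrb.1
    have hr2 : r ≤ 0 := by rw [hr]; exact hrb.2
    clear_value q r
    have h1 : r.toNat = 0 := by omega
    have h2 : (n - r).toNat = 0 := by omega
    rw [PySem.List.pyRange_one_eq_nil (by omega)]
    simp [h1, h2]
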